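-- pv_equiv track=rewrite | github.com/SaarShai/Primes-Equispaced | experiments/uct_extended_test.py | nilpotent_numbers
-- ===== SOURCE A (Python) =====
-- def nilpotent_numbers(N):
--     """n such that every group of order n is nilpotent.
--     Criterion: n is cubefree, and for primes p|n, q|n with p<q,
--     q is not congruent to 1 mod p. (Pakianathan-Shankar)
--     Simplified: just check all prime pairs."""
--     result = []
--     for n in range(1, N + 1):
--         # Factor n
--         temp = n
--         pf = []
--         d = 2
--         while d * d <= temp:
--             if temp % d == 0:
--                 a = 0
--                 while temp % d == 0:
--                     a += 1
--                     temp //= d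
--                 pf.append((d, a))
--             d += 1
--         if temp > 1:
--             pf.append((temp, 1))
--
--         # Check: for all primes p < q dividing n, q^(a_q) not cong 1 mod p
--         is_nilp = True
--         primes_of_n = [p for p, a in pf]
--         for i, p in enumerate(primes_of_n):
--             for j in range(i + 1, len(primes_of_n)):
--                 q = primes_of_n[j]
--                 # Check: q^a_q mod p != 1 and p^a_p mod q != 1
--                 # More precisely: p does not divide q^a - 1 for the exponent a of q
--                 a_q = [a for (pp, a) in pf if pp == q][0]
--                 if (pow(q, a_q, p) - 1) % p == 0 and p > 1:
--                     # p divides q^a_q - 1, not nilpotent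
--                     # But need more careful check: p | (q^b - 1) for some b | a_q
--                     is_nilp = False
--                     break
--             if not is_nilp:
--                 break
--         if is_nilp:
--             result.append(n)
--     return result
-- ===== SOURCE B (Python) =====
-- def nilpotent_numbers(N):
--     """n such that every group of order n is nilpotent (same pair criterion as A),
--     but factoring every n via a smallest-prime-factor sieve built once."""
--     if N < 1:
--         return []
--     spf = [0] * (N + 1)
--     for i in range(2, N + 1):
--         if spf[i] == 0:
--             for j in range(i, N + 1, i):
--                 if spf[j] == 0:
--                     spf[j] = i
--     result = []
--     for n in range(1, N + 1):
--         pf = []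
--         m = n
--         while m > 1:
--             p = spf[m]
--             a = 0
--             while m % p == 0:
--                 m //= p
--                 a += 1
--             pf.append((p, a))
--         ok = True
--         for i in range(len(pf)):
--             p = pf[i][0]
--             for (q, aq) in pf[i + 1:]:
--                 if pow(q, aq, p) == 1:
--                     ok = False
--                     break
--             if not ok:
--                 break
--         if ok:
--             result.append(n)
--     return result
-- ===== Notes on version B (the rewrite author's own statement) =====
-- stated objective: faster
-- what changed: B replaces A's per-n trial-division factorization (O(sqrt n) per n) by a smallest-prime-factor sieve built once, factoring each n by repeated spf lookups, and checks the prime pairs directly over the factor list (pow(q,aq,p)==1) instead of A's index loops with a list-comprehension exponent lookup and (pow-1)%p test.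
import Mathlib
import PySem

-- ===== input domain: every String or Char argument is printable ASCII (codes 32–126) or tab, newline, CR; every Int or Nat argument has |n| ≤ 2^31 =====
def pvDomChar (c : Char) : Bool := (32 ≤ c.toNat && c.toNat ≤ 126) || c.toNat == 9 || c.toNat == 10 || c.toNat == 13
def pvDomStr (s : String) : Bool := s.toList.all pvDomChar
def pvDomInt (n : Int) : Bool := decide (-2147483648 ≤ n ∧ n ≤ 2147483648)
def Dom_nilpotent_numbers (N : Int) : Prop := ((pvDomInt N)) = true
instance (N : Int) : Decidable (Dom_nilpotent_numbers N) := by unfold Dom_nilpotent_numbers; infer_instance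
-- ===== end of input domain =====

-- B replaces A's per-n trial-division factorization by a smallest-prime-factor sieve built
-- once (objective: faster); the prime-pair nilpotency check is kept, in a direct form.


-- ===== PORT A =====
-- inner `while temp % d == 0: a += 1; temp //= d`; returns (a, temp).
-- The conjuncts `2 ≤ d ∧ 0 < temp` only make the recursion total; they hold wherever A runs this loop.
def aPull (temp d : Nat) : Nat × Nat :=
  if h : temp % d = 0 ∧ 2 ≤ d ∧ 0 < temp then
    let r := aPull (temp / d) d
    (r.1 + 1, r.2)
  else (0, temp)
termination_by temp
decreasing_by exact Nat.div_lt_self h.2.2 h.2.1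

-- needed by aLoop's termination argument
theorem aPull_snd_le (temp d : Nat) : (aPull temp d).2 ≤ temp := by
  induction temp using Nat.strong_induction_on with
  | _ temp ih =>
    rw [aPull]
    split
    · next h =>
      exact le_trans (ih _ (Nat.div_lt_self h.2.2 h.2.1)) (le_of_lt (Nat.div_lt_self h.2.2 h.2.1))
    · exact le_refl _

-- the `while d * d <= temp` factorization loop of A (the `∧ 2 ≤ d` conjunct is a totality
-- guard; A always starts this loop at d = 2 and d only grows)
def aLoop (temp d : Nat) (pf : List (Nat × Nat)) : List (Nat × Nat) :=
  if h : d * d ≤ temp ∧ 2 ≤ d then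
    if h2 : temp % d = 0 then
      aLoop (aPull temp d).2 (d + 1) (pf ++ [(d, (aPull temp d).1)])
    else aLoop temp (d + 1) pf
  else if 1 < temp then pf ++ [(temp, 1)] else pf
termination_by temp + 2 - d
decreasing_by
  · have hd : d ≤ d * d := Nat.le_mul_of_pos_left d (by omega)
    have hlt : (aPull temp d).2 < temp := by
      have hc : temp % d = 0 ∧ 2 ≤ d ∧ 0 < temp := ⟨h2, h.2, by omega⟩
      rw [aPull, dif_pos hc]
      exact lt_of_le_of_lt (aPull_snd_le _ _) (Nat.div_lt_self hc.2.2 hc.2.1)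
    omega
  · have hd : d ≤ d * d := Nat.le_mul_of_pos_left d (by omega)
    omega

-- `[a for (pp, a) in pf if pp == q][0]`; the index [0] never raises in A since q is one of
-- pf's primes, so the total `headD 0` is exact here
def aLookup (pf : List (Nat × Nat)) (q : Nat) : Nat :=
  ((pf.filter (fun x => x.1 == q)).map Prod.snd).headD 0

-- inner `for j in range(i + 1, len(primes_of_n))` with its break
def aInner (pf : List (Nat × Nat)) (primes : List Nat) (p : Nat) (j : Nat) : Bool :=
  if h : j < primes.length then
    let q := primes[j]
    let aq := aLookup pf q
    if PySem.Int.mod (PySem.Int.powMod (q : Int) aq (p : Int) - 1) (p : Int) == 0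
        && decide ((1 : Int) < (p : Int)) then false
    else aInner pf primes p (j + 1)
  else true
termination_by primes.length - j

-- outer `for i, p in enumerate(primes_of_n)` with the is_nilp flag breaks
def aOuter (pf : List (Nat × Nat)) (primes : List Nat) (i : Nat) : Bool :=
  if h : i < primes.length then
    if aInner pf primes primes[i] (i + 1) then aOuter pf primes (i + 1) else false
  else true
termination_by primes.length - i

def nilpotent_numbers (N : Int) : List Int :=
  (PySem.List.pyRange 1 (N + 1) 1).foldl
    (fun result n =>
      let pf := aLoop n.toNat 2 []   -- n ≥ 1 inside the range, so .toNat is exact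
      if aOuter pf (pf.map Prod.fst) 0 then result ++ [n] else result)
    []

-- ===== PORT B =====
-- `while m % p == 0: m //= p; a += 1`; the conjuncts `2 ≤ p ∧ 0 < m` only make it total
def bPull (m p : Nat) : Nat × Nat :=
  if h : m % p = 0 ∧ 2 ≤ p ∧ 0 < m then
    let r := bPull (m / p) p
    (r.1 + 1, r.2)
  else (0, m)
termination_by m
decreasing_by exact Nat.div_lt_self h.2.2 h.2.1

theorem bPull_eq_aPull (m p : Nat) : bPull m p = aPull m p := by
  induction m using Nat.strong_induction_on with
  | _ m ih =>
    rw [bPull, aPull]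
    split
    · next h => rw [ih _ (Nat.div_lt_self h.2.2 h.2.1)]
    · rfl

-- needed by bFactor's termination argument
theorem bPull_snd_lt (m p : Nat) (hp : 2 ≤ p) (hd : p ∣ m) (hm : 0 < m) :
    (bPull m p).2 < m := by
  have hc : m % p = 0 ∧ 2 ≤ p ∧ 0 < m := ⟨Nat.dvd_iff_mod_eq_zero.mp hd, hp, hm⟩
  rw [bPull_eq_aPull, aPull, dif_pos hc]
  exact lt_of_le_of_lt (aPull_snd_le _ _) (Nat.div_lt_self hm hp)

-- the smallest-prime-factor sieve: spf = [0]*(N+1); for i in 2..N: if spf[i]==0: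
--   for j in range(i, N+1, i): if spf[j]==0: spf[j] = i
def bSieve (N : Int) : List Nat :=
  (PySem.List.pyRange 2 (N + 1) 1).foldl
    (fun spf i =>
      if PySem.List.pyGetD spf i 0 = 0 then
        (PySem.List.pyRange i (N + 1) i).foldl
          (fun s j => if PySem.List.pyGetD s j 0 = 0 then PySem.List.pySetD s j i.toNat else s)
          spf
      else spf)
    (List.replicate (N + 1).toNat 0)

-- `while m > 1: p = spf[m]; divide out p; pf.append((p, a))`.  The dite `2 ≤ p ∧ p ∣ m` is a
-- totality guard only: spf[m] is always a prime divisor of m when B calls this.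
def bFactor (spf : List Nat) (m : Nat) : List (Nat × Nat) :=
  if h1 : 1 < m then
    let p := spf.getD m 0   -- spf[m]; m is in range whenever B calls this
    let r := bPull m p
    if h2 : 2 ≤ p ∧ p ∣ m then
      (p, r.1) :: bFactor spf r.2
    else [(p, r.1)]
  else []
termination_by m
decreasing_by exact bPull_snd_lt m _ h2.1 h2.2 (by omega)

-- `for (q, aq) in pf[i+1:]` with its break
def bInner (p : Nat) (rest : List (Nat × Nat)) : Bool :=
  match rest with
  | [] => true
  | (q, aq) :: t => if PySem.Int.powMod (q : Int) aq (p : Int) == 1 then false else bInner p t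

-- `for i in range(len(pf))` with the ok flag breaks
def bOuter (pf : List (Nat × Nat)) (i : Nat) : Bool :=
  if h : i < pf.length then
    if bInner pf[i].1 (PySem.List.slice pf (some ((i : Int) + 1)) none) then bOuter pf (i + 1)
    else false
  else true
termination_by pf.length - i

def nilpotent_numbers_alt (N : Int) : List Int :=
  if N < 1 then []
  else
    let spf := bSieve N
    (PySem.List.pyRange 1 (N + 1) 1).foldl
      (fun result n =>
        let pf := bFactor spf n.toNat   -- n ≥ 1 inside the range, so .toNat is exact
        if bOuter pf 0 then result ++ [n] else result)
      []

-- ===== PRECONDITION & SPEC =====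
def Spec_nilpotent_numbers (N : Int) (out : List Int) : Prop := out = nilpotent_numbers_alt N
instance (N : Int) (out : List Int) : Decidable (Spec_nilpotent_numbers N out) := by unfold Spec_nilpotent_numbers; infer_instance

-- ===== CLAIM (what is proved, stated in full; the proofs are below) =====
def Claim_equal_nilpotent_numbers : Prop := ∀ (N : Int), Dom_nilpotent_numbers N → Spec_nilpotent_numbers N (nilpotent_numbers N)

-- ===== LEMMAS AND PROOFS =====

theorem aPull_snd_lt (m p : Nat) (hp : 2 ≤ p) (hd : p ∣ m) (hm : 0 < m) :
    (aPull m p).2 < m := by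
  rw [← bPull_eq_aPull]; exact bPull_snd_lt m p hp hd hm

-- canonical factorization by least prime factor: the common value of both ports' factor lists
def cf (m : Nat) : List (Nat × Nat) :=
  if h : 1 < m then
    let r := aPull m m.minFac
    (m.minFac, r.1) :: cf r.2
  else []
termination_by m
decreasing_by
  exact aPull_snd_lt m m.minFac (Nat.minFac_prime (by omega)).two_le (Nat.minFac_dvd m) (by omega)

theorem aPull_spec (p : Nat) (hp : 2 ≤ p) : ∀ m, 0 < m →
    m = p ^ (aPull m p).1 * (aPull m p).2 ∧ ¬ p ∣ (aPull m p).2 ∧ 0 < (aPull m p).2 := by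
  intro m
  induction m using Nat.strong_induction_on with
  | _ m ih =>
    intro hm
    rw [aPull]
    split
    · next h =>
      have hdvd : p ∣ m := Nat.dvd_of_mod_eq_zero h.1
      have hlt : m / p < m := Nat.div_lt_self hm hp
      have hpos : 0 < m / p := Nat.div_pos (Nat.le_of_dvd hm hdvd) (by omega)
      obtain ⟨h1, h2, h3⟩ := ih (m / p) hlt hpos
      refine ⟨?_, h2, h3⟩
      dsimp only
      rw [pow_succ]
      calc m = m / p * p := (Nat.div_mul_cancel hdvd).symm
        _ = p ^ (aPull (m / p) p).1 * (aPull (m / p) p).2 * p := by rw [← h1]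
        _ = p ^ (aPull (m / p) p).1 * p * (aPull (m / p) p).2 := by ring
    · next h =>
      refine ⟨by simp, ?_, hm⟩
      intro hdvd
      exact h ⟨Nat.dvd_iff_mod_eq_zero.mp hdvd, hp, hm⟩

theorem cf_mem (m : Nat) : ∀ x ∈ cf m, x.1.Prime ∧ x.1 ∣ m := by
  induction m using Nat.strong_induction_on with
  | _ m ih =>
    intro x hx
    rw [cf] at hx
    split at hx
    · next h =>
      have hp2 := (Nat.minFac_prime (by omega : m ≠ 1)).two_le
      have hspec := aPull_spec m.minFac hp2 m (by omega)
      have hlt := aPull_snd_lt m m.minFac hp2 (Nat.minFac_dvd m) (by omega)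
      dsimp only at hx
      rcases List.mem_cons.1 hx with hx | hx
      · rw [hx]
        exact ⟨Nat.minFac_prime (by omega : m ≠ 1), Nat.minFac_dvd m⟩
      · obtain ⟨hxp, hxd⟩ := ih _ hlt x hx
        refine ⟨hxp, hxd.trans ⟨m.minFac ^ (aPull m m.minFac).1, ?_⟩⟩
        rw [mul_comm, ← hspec.1]
    · simp at hx

theorem cf_pairwise (m : Nat) : (cf m).Pairwise (fun x y => x.1 < y.1) := by
  induction m using Nat.strong_induction_on with
  | _ m ih =>
    rw [cf]
    split
    · next h =>
      have hp2 := (Nat.minFac_prime (by omega : m ≠ 1)).two_le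
      have hspec := aPull_spec m.minFac hp2 m (by omega)
      have hlt := aPull_snd_lt m m.minFac hp2 (Nat.minFac_dvd m) (by omega)
      dsimp only
      refine List.pairwise_cons.2 ⟨?_, ih _ hlt⟩
      intro y hy
      obtain ⟨hyp, hyd⟩ := cf_mem _ y hy
      have hydm : y.1 ∣ m :=
        hyd.trans ⟨m.minFac ^ (aPull m m.minFac).1, by rw [mul_comm, ← hspec.1]⟩
      have hge : m.minFac ≤ y.1 := Nat.minFac_le_of_dvd hyp.two_le hydm
      have hne : y.1 ≠ m.minFac := by
        intro heq
        exact hspec.2.1 (heq ▸ hyd)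
      omega
    · exact List.Pairwise.nil

theorem aLoop_eq_cf : ∀ (temp d : Nat) (pf : List (Nat × Nat)), 2 ≤ d → 0 < temp →
    (∀ k, 2 ≤ k → k < d → ¬ k ∣ temp) → aLoop temp d pf = pf ++ cf temp := by
  intro temp d pf
  induction temp, d, pf using aLoop.induct with
  | case1 temp d pf h h2 ih =>
    intro hd ht hinv
    have hdvd : d ∣ temp := Nat.dvd_of_mod_eq_zero h2
    have hd1 : d ≤ d * d := Nat.le_mul_of_pos_left d (by omega)
    have h1t : 1 < temp := by omega
    have hmin : temp.minFac = d := by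
      have hle : temp.minFac ≤ d := Nat.minFac_le_of_dvd h.2 hdvd
      have hpr := Nat.minFac_prime (by omega : temp ≠ 1)
      by_contra hne
      exact hinv temp.minFac hpr.two_le (by omega) (Nat.minFac_dvd temp)
    have hspec := aPull_spec d h.2 temp ht
    have hinv' : ∀ k, 2 ≤ k → k < d + 1 → ¬ k ∣ (aPull temp d).2 := by
      intro k hk2 hkd hkdvd
      have hkt : k ∣ temp :=
        hkdvd.trans ⟨d ^ (aPull temp d).1, by rw [mul_comm, ← hspec.1]⟩
      rcases Nat.lt_or_ge k d with hlt2 | hge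
      · exact hinv k hk2 hlt2 hkt
      · have hkd' : k = d := by omega
        exact hspec.2.1 (hkd' ▸ hkdvd)
    rw [aLoop, dif_pos h, dif_pos h2]
    rw [ih (by omega) hspec.2.2 hinv']
    conv_rhs => rw [cf, dif_pos h1t]
    dsimp only
    rw [hmin]
    simp

  | case2 temp d pf h h2 ih =>
    intro hd ht hinv
    rw [aLoop, dif_pos h, dif_neg h2]
    apply ih (by omega) ht
    intro k hk2 hkd hdvd
    rcases Nat.lt_or_ge k d with hlt2 | hge
    · exact hinv k hk2 hlt2 hdvd
    · have hkd' : k = d := by omega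
      exact h2 (Nat.dvd_iff_mod_eq_zero.mp (hkd' ▸ hdvd))
  | case3 temp d pf h h1 =>
    intro hd ht hinv
    rw [aLoop, dif_neg h, if_pos h1]
    have hsq : ¬ d * d ≤ temp := fun hc => h ⟨hc, hd⟩
    have hprime : temp.Prime := by
      by_contra hnp
      have hpd : temp.minFac ∣ temp := Nat.minFac_dvd temp
      have hppr := Nat.minFac_prime (by omega : temp ≠ 1)
      have hpne : temp.minFac ≠ temp := by
        intro he
        exact hnp (he ▸ hppr)
      have hq : temp / temp.minFac ∣ temp := ⟨temp.minFac, (Nat.div_mul_cancel hpd).symm⟩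
      have hq2 : 2 ≤ temp / temp.minFac := by
        have hpos : 0 < temp / temp.minFac := Nat.div_pos (Nat.le_of_dvd (by omega) hpd) hppr.pos
        have hne1 : temp / temp.minFac ≠ 1 := by
          intro he
          have h3 := Nat.div_mul_cancel hpd
          rw [he, one_mul] at h3
          exact hpne h3
        omega
      have hle : temp.minFac ≤ temp / temp.minFac := Nat.minFac_le_of_dvd hq2 hq
      have hpp : temp.minFac * temp.minFac ≤ temp := by
        calc temp.minFac * temp.minFac ≤ temp.minFac * (temp / temp.minFac) :=
              Nat.mul_le_mul_left _ hle
          _ = temp := Nat.mul_div_cancel' hpd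
      have hpd2 : temp.minFac < d := by
        by_contra hge
        push_neg at hge
        have : d * d ≤ temp.minFac * temp.minFac := Nat.mul_le_mul hge hge
        omega
      exact hinv temp.minFac hppr.two_le hpd2 hpd
    have hmin : temp.minFac = temp := Nat.Prime.minFac_eq hprime
    have hpull : aPull temp temp = (1, 1) := by
      rw [aPull, dif_pos ⟨Nat.mod_self temp, hprime.two_le, ht⟩]
      rw [Nat.div_self ht]
      rw [aPull, dif_neg]
      · intro hc
        rw [Nat.mod_eq_of_lt (by omega : 1 < temp)] at hc
        omega
    have hcf1 : cf 1 = [] := by rw [cf, dif_neg (by omega)]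
    rw [cf, dif_pos h1]
    dsimp only
    rw [hmin, hpull]
    rw [hcf1]
  | case4 temp d pf h h1 =>
    intro hd ht hinv
    rw [aLoop, dif_neg h, if_neg h1]
    have he : temp = 1 := by omega
    rw [he, cf, dif_neg (by omega)]
    simp

theorem sieve_inner (v : Nat) (hv : 0 < v) : ∀ (js : List Int) (s : List Nat),
    (∀ j ∈ js, 0 ≤ j ∧ j.toNat < s.length) →
    ((js.foldl (fun s j => if PySem.List.pyGetD s j 0 = 0 then PySem.List.pySetD s j v else s) s).length = s.length ∧
     ∀ m : Nat, (js.foldl (fun s j => if PySem.List.pyGetD s j 0 = 0 then PySem.List.pySetD s j v else s) s).getD m 0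
        = if (m : Int) ∈ js ∧ s.getD m 0 = 0 then v else s.getD m 0) := by
  intro js
  induction js with
  | nil => intro s _; simp
  | cons j t ih =>
    intro s hjs
    obtain ⟨hj0, hjlen⟩ := hjs j List.mem_cons_self
    simp only [List.foldl_cons]
    rw [PySem.List.pyGetD_of_nonneg s 0 hj0, PySem.List.pySetD_of_nonneg s v hj0]
    set s1 := if s.getD j.toNat 0 = 0 then s.set j.toNat v else s with hs1
    have hlen1 : s1.length = s.length := by rw [hs1]; split <;> simp
    have ihres := ih s1 (fun j' hj' => by rw [hlen1]; exact hjs j' (List.mem_cons_of_mem _ hj'))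
    refine ⟨ihres.1.trans hlen1, ?_⟩
    intro m
    rw [ihres.2 m]
    by_cases hmj : (m : Int) = j
    · have hmt : j.toNat = m := by omega
      by_cases hA : s.getD m 0 = 0
      · have hs1m : s1.getD m 0 = v := by
          rw [hs1, hmt, if_pos hA]
          simp [List.getD_eq_getElem?_getD, List.getElem?_set, hmt ▸ hjlen]
        rw [hs1m, ite_self, if_pos ⟨by rw [hmj]; exact List.mem_cons_self, hA⟩]
      · have hs1e : s1 = s := by rw [hs1, hmt, if_neg hA]
        rw [hs1e, if_neg (fun hcon => hA hcon.2), if_neg (fun hcon => hA hcon.2)]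
    · have hmne : j.toNat ≠ m := by omega
      have hs1m : s1.getD m 0 = s.getD m 0 := by
        rw [hs1]; split
        · simp [List.getD_eq_getElem?_getD, List.getElem?_set, hmne]
        · rfl
      rw [hs1m]
      have hmemiff : ((m : Int) ∈ j :: t) ↔ ((m : Int) ∈ t) := by simp [List.mem_cons, hmj]
      simp only [hmemiff]

-- the outer-loop step of B's sieve, named for the invariant proof
def sieveStep (n : Nat) : List Nat → Int → List Nat :=
  fun spf i =>
    if PySem.List.pyGetD spf i 0 = 0 then
      (PySem.List.pyRange i ((n : Int) + 1) i).foldl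
        (fun s j => if PySem.List.pyGetD s j 0 = 0 then PySem.List.pySetD s j i.toNat else s)
        spf
    else spf

def sieveFold (n : Nat) (c : Nat) : List Nat :=
  (PySem.List.pyRange 2 (2 + (c : Int)) 1).foldl (sieveStep n) (List.replicate (n + 1) 0)

theorem bSieve_eq (n : Nat) (hn : 1 ≤ n) : bSieve (n : Int) = sieveFold n (n - 1) := by
  unfold bSieve sieveFold sieveStep
  have h1 : ((n : Int) + 1).toNat = n + 1 := by omega
  have h2 : (2 + ((n - 1 : Nat) : Int)) = (n : Int) + 1 := by omega
  rw [h1, h2]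

theorem sieve_outer (n : Nat) : ∀ c : Nat, 2 + c ≤ n + 1 →
    (sieveFold n c).length = n + 1 ∧
    ∀ m : Nat, 2 ≤ m → m < n + 1 →
      (sieveFold n c).getD m 0 = if m.minFac ≤ 1 + c then m.minFac else 0 := by
  intro c
  induction c with
  | zero =>
    intro _
    unfold sieveFold
    rw [PySem.List.pyRange_one_eq_nil (by omega)]
    refine ⟨by simp, ?_⟩
    intro m hm _
    have := (Nat.minFac_prime (by omega : m ≠ 1)).two_le
    rw [List.foldl_nil, if_neg (by omega)]
    by_cases hmn : m < n + 1 <;>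
      simp [List.getD_eq_getElem?_getD, List.getElem?_replicate, hmn]
  | succ c ih =>
    intro hc
    have hprev := ih (by omega)
    unfold sieveFold at hprev ⊢
    have hsplit : (2 + ((c + 1 : Nat) : Int)) = (2 + (c : Int)) + 1 := by push_cast; ring
    rw [hsplit, PySem.List.pyRange_one_succ_right (by omega), List.foldl_append]
    set prev := (PySem.List.pyRange 2 (2 + (c : Int)) 1).foldl (sieveStep n)
      (List.replicate (n + 1) 0) with hprevdef
    simp only [List.foldl_cons, List.foldl_nil]
    have hiP : ((2 : Int) + (c : Int)) = ((2 + c : Nat) : Int) := by push_cast; ring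
    rw [hiP]
    unfold sieveStep
    rw [PySem.List.pyGetD_of_nonneg prev 0 (by positivity), Int.toNat_natCast]
    have hPn : 2 + c ≤ n := by omega
    have hprevP := hprev.2 (2 + c) (by omega) (by omega)
    by_cases hz : prev.getD (2 + c) 0 = 0
    · rw [if_pos hz]
      have hminP : (2 + c).minFac = 2 + c := by
        have hm1 : ¬ (2 + c).minFac ≤ 1 + c := by
          intro hle
          rw [hprevP, if_pos hle] at hz
          have := (Nat.minFac_prime (by omega : 2 + c ≠ 1)).two_le
          omega
        have hm2 : (2 + c).minFac ≤ 2 + c := Nat.minFac_le (by omega)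
        omega
      have hPrime : (2 + c).Prime := by
        have h := Nat.minFac_prime (by omega : 2 + c ≠ 1)
        rwa [hminP] at h
      have hmem : ∀ j ∈ PySem.List.pyRange ((2 + c : Nat) : Int) ((n : Int) + 1) ((2 + c : Nat) : Int),
          0 ≤ j ∧ j.toNat < prev.length := by
        intro j hj
        rw [PySem.List.mem_pyRange_iff_of_pos (by positivity)] at hj
        refine ⟨by omega, ?_⟩
        rw [hprev.1]; omega
      have hinner := sieve_inner (2 + c) (by omega)
        (PySem.List.pyRange ((2 + c : Nat) : Int) ((n : Int) + 1) ((2 + c : Nat) : Int)) prev hmem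
      refine ⟨by rw [hinner.1, hprev.1], ?_⟩
      intro m hm2 hmn
      rw [hinner.2 m]
      by_cases hm1 : m.minFac ≤ 1 + c
      · have hval : prev.getD m 0 = m.minFac := by rw [hprev.2 m hm2 hmn, if_pos hm1]
        have hne : ¬ prev.getD m 0 = 0 := by
          rw [hval]
          have := (Nat.minFac_prime (by omega : m ≠ 1)).two_le
          omega
        rw [if_neg (by tauto), hval, if_pos (by omega)]
      · have hz2 : prev.getD m 0 = 0 := by rw [hprev.2 m hm2 hmn, if_neg hm1]
        by_cases hdvd : (2 + c) ∣ m
        · have hle : m.minFac ≤ 2 + c := Nat.minFac_le_of_dvd (by omega) hdvd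
          have heq : m.minFac = 2 + c := by omega
          have hmemm : (m : Int) ∈ PySem.List.pyRange ((2 + c : Nat) : Int) ((n : Int) + 1)
              ((2 + c : Nat) : Int) := by
            rw [PySem.List.mem_pyRange_iff_of_pos (by positivity)]
            refine ⟨?_, by omega, ?_⟩
            · exact_mod_cast Nat.le_of_dvd (by omega) hdvd
            · exact dvd_sub (Int.natCast_dvd_natCast.2 hdvd) dvd_rfl
          rw [if_pos ⟨hmemm, hz2⟩, if_pos (by omega), heq]
        · have hnm : (m : Int) ∉ PySem.List.pyRange ((2 + c : Nat) : Int) ((n : Int) + 1)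
              ((2 + c : Nat) : Int) := by
            intro hmem2
            rw [PySem.List.mem_pyRange_iff_of_pos (by positivity)] at hmem2
            exact hdvd (Int.natCast_dvd_natCast.1 (dvd_sub_self_right.mp hmem2.2.2))
          rw [if_neg (by tauto), hz2, if_neg]
          intro hle
          have heq : m.minFac = 2 + c := by omega
          exact hdvd (heq ▸ Nat.minFac_dvd m)
    · rw [if_neg hz]
      have hminP : (2 + c).minFac ≤ 1 + c := by
        by_contra hgt
        rw [hprevP, if_neg hgt] at hz
        exact hz rfl
      refine ⟨hprev.1, ?_⟩
      intro m hm2 hmn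
      rw [hprev.2 m hm2 hmn]
      by_cases hm1 : m.minFac ≤ 1 + c
      · rw [if_pos hm1, if_pos (by omega)]
      · rw [if_neg hm1, if_neg]
        intro hle
        have heq : m.minFac = 2 + c := by omega
        have hp : (2 + c).Prime := heq ▸ Nat.minFac_prime (by omega : m ≠ 1)
        have := Nat.Prime.minFac_eq hp
        omega

theorem bSieve_correct (N : Int) (hN : 1 ≤ N) (m : Nat) (h2 : 2 ≤ m) (hm : (m : Int) ≤ N) :
    (bSieve N).getD m 0 = m.minFac := by
  have hNn : N = (N.toNat : Nat) := by omega
  have h1 : 1 ≤ N.toNat := by omega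
  rw [hNn, bSieve_eq N.toNat h1]
  rw [(sieve_outer N.toNat (N.toNat - 1) (by omega)).2 m h2 (by omega)]
  rw [if_pos]
  have := Nat.minFac_le (show 0 < m by omega)
  omega

theorem bFactor_eq_cf (spf : List Nat) (n : Nat)
    (hs : ∀ m', 2 ≤ m' → m' ≤ n → spf.getD m' 0 = m'.minFac) :
    ∀ m, m ≤ n → bFactor spf m = cf m := by
  intro m
  induction m using Nat.strong_induction_on with
  | _ m ih =>
    intro hmn
    rw [bFactor, cf]
    by_cases h1 : 1 < m
    · rw [dif_pos h1, dif_pos h1]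
      have hsm : spf.getD m 0 = m.minFac := hs m (by omega) hmn
      have hp2 := (Nat.minFac_prime (by omega : m ≠ 1)).two_le
      have hdvd := Nat.minFac_dvd m
      dsimp only
      rw [hsm, dif_pos ⟨hp2, hdvd⟩, bPull_eq_aPull]
      have hlt := aPull_snd_lt m m.minFac hp2 hdvd (by omega)
      rw [ih _ hlt (by omega)]
    · rw [dif_neg h1, dif_neg h1]

theorem filter_eq_singleton : ∀ (pf : List (Nat × Nat)), pf.Pairwise (fun x y => x.1 < y.1) →
    ∀ j (hj : j < pf.length), pf.filter (fun x => x.1 == pf[j].1) = [pf[j]] := by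
  intro pf
  induction pf with
  | nil => intro _ j hj; simp at hj
  | cons x t ih =>
    intro hpw j hj
    have hx := (List.pairwise_cons.1 hpw).1
    have ht := (List.pairwise_cons.1 hpw).2
    cases j with
    | zero =>
      have hft : t.filter (fun y => y.1 == x.1) = [] :=
        List.filter_eq_nil_iff.2 (fun y hy => by
          have := hx y hy
          simp only [beq_iff_eq]
          omega)
      simp [List.filter_cons, hft]
    | succ j =>
      have hj' : j < t.length := by simpa using hj
      have hmem : t[j] ∈ t := List.getElem_mem hj'
      have hne : ¬ (x.1 == t[j].1) = true := by
        have := hx _ hmem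
        simp only [beq_iff_eq]
        omega
      simp only [List.getElem_cons_succ, List.filter_cons, hne]
      simp only [Bool.false_eq_true, if_false]
      exact ih ht j hj'

theorem cond_eq (p q aq : Nat) (hp : 2 ≤ p) :
    (PySem.Int.mod (PySem.Int.powMod (q : Int) aq (p : Int) - 1) (p : Int) == 0
      && decide ((1 : Int) < (p : Int)))
    = (PySem.Int.powMod (q : Int) aq (p : Int) == 1) := by
  have hp0 : (0 : Int) < (p : Int) := by exact_mod_cast (show 0 < p by omega)
  have hr0 : 0 ≤ PySem.Int.powMod (q : Int) aq (p : Int) := by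
    unfold PySem.Int.powMod
    exact PySem.Int.mod_nonneg _ hp0
  have hrp : PySem.Int.powMod (q : Int) aq (p : Int) < (p : Int) := by
    unfold PySem.Int.powMod
    exact PySem.Int.mod_lt _ hp0
  have h1p : (1 : Int) < (p : Int) := by exact_mod_cast (show 1 < p by omega)
  rw [decide_eq_true h1p, Bool.and_true]
  rw [Bool.eq_iff_iff, beq_iff_eq, beq_iff_eq, PySem.Int.mod_eq_zero_iff_dvd]
  constructor
  · intro hdvd
    have := Int.eq_zero_of_abs_lt_dvd hdvd (by rw [abs_lt]; constructor <;> omega)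
    omega
  · intro h
    rw [h]
    simp

theorem inner_eq (pf : List (Nat × Nat)) (hpw : pf.Pairwise (fun x y => x.1 < y.1))
    (p : Nat) (hp : 2 ≤ p) : ∀ k j, pf.length - j = k →
    aInner pf (pf.map Prod.fst) p j = bInner p (pf.drop j) := by
  intro k
  induction k with
  | zero =>
    intro j hj
    rw [aInner, dif_neg (by simp; omega), List.drop_eq_nil_of_le (by omega)]
    rfl
  | succ k ih =>
    intro j hj
    have hjlen : j < pf.length := by omega
    rw [aInner, dif_pos (by simpa using hjlen)]
    dsimp only
    simp only [List.getElem_map]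
    have haq : aLookup pf pf[j].1 = pf[j].2 := by
      unfold aLookup
      rw [filter_eq_singleton pf hpw j hjlen]
      rfl
    rw [haq, cond_eq _ _ _ hp]
    rw [← List.getElem_cons_drop hjlen]
    rcases hx : pf[j] with ⟨qq, aa⟩
    simp only [hx, bInner]
    cases hcb : (PySem.Int.powMod (qq : Int) aa (p : Int) == 1) with
    | true => simp [hcb]
    | false => simp [hcb, ih (j + 1) (by omega)]

theorem outer_eq (pf : List (Nat × Nat)) (hpw : pf.Pairwise (fun x y => x.1 < y.1))
    (h2 : ∀ x ∈ pf, 2 ≤ x.1) : ∀ k i, pf.length - i = k →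
    aOuter pf (pf.map Prod.fst) i = bOuter pf i := by
  intro k
  induction k with
  | zero =>
    intro i hi
    rw [aOuter, dif_neg (by simp; omega), bOuter, dif_neg (by omega)]
  | succ k ih =>
    intro i hi
    have hilen : i < pf.length := by omega
    rw [aOuter, dif_pos (by simpa using hilen), bOuter, dif_pos hilen]
    simp only [List.getElem_map]
    have hslice : PySem.List.slice pf (some ((i : Int) + 1)) none = pf.drop (i + 1) := by
      have hcast : ((i : Int) + 1) = ((i + 1 : Nat) : Int) := by push_cast; ring
      rw [hcast, PySem.List.slice_from_natCast]
    rw [hslice]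
    have h2i : 2 ≤ pf[i].1 := h2 _ (List.getElem_mem hilen)
    rw [inner_eq pf hpw _ h2i (pf.length - (i + 1)) (i + 1) rfl]
    cases hb : bInner pf[i].1 (pf.drop (i + 1)) with
    | true => simp [hb, ih (i + 1) (by omega)]
    | false => simp [hb]

theorem main_eq (N : Int) : nilpotent_numbers N = nilpotent_numbers_alt N := by
  unfold nilpotent_numbers nilpotent_numbers_alt
  by_cases hN : N < 1
  · rw [if_pos hN, PySem.List.pyRange_one_eq_nil (by omega)]
    rfl
  · rw [if_neg hN]
    dsimp only
    apply PySem.List.foldl_congr_mem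
    intro acc n hn
    rw [PySem.List.mem_pyRange_one] at hn
    dsimp only
    have hm1 : 1 ≤ n.toNat := by omega
    have hA : aLoop n.toNat 2 [] = cf n.toNat := by
      have h := aLoop_eq_cf n.toNat 2 [] (le_refl 2) (by omega) (by intro k hk2 hk _; omega)
      simpa using h
    have hB : bFactor (bSieve N) n.toNat = cf n.toNat := by
      apply bFactor_eq_cf (bSieve N) N.toNat
      · intro m' h2' hm'
        exact bSieve_correct N (by omega) m' h2' (by omega)
      · omega
    rw [hA, hB]
    have hout : aOuter (cf n.toNat) ((cf n.toNat).map Prod.fst) 0 = bOuter (cf n.toNat) 0 := by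
      apply outer_eq (cf n.toNat) (cf_pairwise n.toNat)
        (fun x hx => (cf_mem n.toNat x hx).1.two_le) ((cf n.toNat).length) 0 (by omega)
    rw [hout]

-- ===== VERDICT (by name: the statement is the Claim_ definition above) =====
theorem nilpotent_numbers_spec : Claim_equal_nilpotent_numbers := by
  intro N _
  unfold Spec_nilpotent_numbers
  exact main_eq N
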